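-- pv_equiv track=rewrite | github.com/komaksym/biggitybiggityO | src/scraping/leetcode_solutions/solutions/smallest-subarrays-with-maximum-bitwise-or.py | smallestSubarrays
-- ===== SOURCE A (Python) =====
-- def smallestSubarrays(nums):
--
--     result = [0]*len(nums)
--     lookup = [-1]*max(max(nums).bit_length(), 1)
--     for i in reversed(range(len(nums))):
--         for bit in range(len(lookup)):
--             if nums[i]&(1<<bit):
--                 lookup[bit] = i
--         result[i] = max(max(lookup)-i+1, 1)
--     return result
-- ===== SOURCE B (Python) =====
-- def smallestSubarrays(nums):
--     n = len(nums)
--     width = max(max(nums).bit_length(), 1)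
--     cnt = [0] * width
--     result = [0] * n
--     j = n - 1
--     for i in range(n - 1, -1, -1):
--         for b in range(width):
--             if nums[i] & (1 << b):
--                 cnt[b] += 1
--         while j > i and all(cnt[b] > 1 for b in range(width) if nums[j] & (1 << b)):
--             for b in range(width):
--                 if nums[j] & (1 << b):
--                     cnt[b] -= 1
--             j -= 1
--         result[i] = j - i + 1
--     return result
-- ===== Notes on version B (the rewrite author's own statement) =====
-- stated objective: alternative
-- what changed: Replaces A's per-bit latest-index table with max-scan per position by a two-pointer sliding window that maintains per-bit counts and shrinks the right end while its last element is redundant; Pre_ excludes only the empty list, on which Python's max(nums) raises ValueError in A (and in B alike).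
import Mathlib
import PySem

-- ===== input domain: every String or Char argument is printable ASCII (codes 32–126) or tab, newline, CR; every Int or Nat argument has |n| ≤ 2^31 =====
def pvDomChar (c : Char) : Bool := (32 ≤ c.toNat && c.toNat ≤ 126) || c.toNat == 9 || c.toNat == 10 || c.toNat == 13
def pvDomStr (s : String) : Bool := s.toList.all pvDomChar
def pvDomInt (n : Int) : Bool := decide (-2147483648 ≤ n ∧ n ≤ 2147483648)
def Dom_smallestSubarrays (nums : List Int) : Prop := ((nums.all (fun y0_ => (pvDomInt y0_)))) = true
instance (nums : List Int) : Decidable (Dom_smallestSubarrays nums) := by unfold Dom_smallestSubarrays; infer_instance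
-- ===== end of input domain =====

-- B replaces A's per-bit latest-index table (with a max-scan per position) by a two-pointer
-- sliding window maintaining per-bit counts (objective: alternative, same answers).

-- ===== PORT A =====
-- for i in reversed(range(len(nums))): inner loop over bits updates lookup, result[i] is set
def pvALoop (nums : List Int) : Nat → List Int → List Int → List Int
  | 0, result, _ => result
  | c + 1, result, lookup =>
      let lookup' := (List.range lookup.length).foldl
        (fun (lk : List Int) (bit : Nat) =>
          if PySem.Int.band (PySem.List.pyGetD nums (c : Int) 0) ((1 : Int) <<< bit) ≠ 0 then
            PySem.List.pySetD lk (bit : Int) (c : Int)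
          else lk) lookup
      pvALoop nums c
        (PySem.List.pySetD result (c : Int)
          (max ((PySem.List.max? lookup' id).getD 0 - (c : Int) + 1) 1))
        lookup'

def smallestSubarrays (nums : List Int) : List Int :=
  pvALoop nums nums.length (List.replicate nums.length 0)
    (List.replicate (max (PySem.Int.bitLength ((PySem.List.max? nums id).getD 0)) 1) (-1))

-- ===== PORT B =====
-- for b in range(width): if x & (1 << b): cnt[b] += s   (s = 1 when adding nums[i], s = -1 when dropping nums[j])
def pvBump (x : Int) (W : Nat) (s : Int) (cnt : List Int) : List Int :=
  (List.range W).foldl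
    (fun (c : List Int) (b : Nat) =>
      if PySem.Int.band x ((1 : Int) <<< b) ≠ 0 then
        PySem.List.pySetD c (b : Int) (PySem.List.pyGetD c (b : Int) 0 + s)
      else c) cnt

-- all(cnt[b] > 1 for b in range(width) if x & (1 << b))
def pvAllCond (x : Int) (W : Nat) (cnt : List Int) : Bool :=
  (List.range W).all (fun b =>
    if PySem.Int.band x ((1 : Int) <<< b) ≠ 0 then
      decide (1 < PySem.List.pyGetD cnt (b : Int) 0)
    else true)

-- while j > i and all(...): decrement bits of nums[j]; j -= 1
def pvShrink (nums : List Int) (W : Nat) (i : Nat) : Nat → List Int → Nat × List Int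
  | j, cnt =>
    if h : i < j ∧ pvAllCond (PySem.List.pyGetD nums (j : Int) 0) W cnt = true then
      pvShrink nums W i (j - 1) (pvBump (PySem.List.pyGetD nums (j : Int) 0) W (-1) cnt)
    else (j, cnt)
  termination_by j => j
  decreasing_by omega

-- for i in range(n-1, -1, -1): add nums[i]'s bits, shrink, result[i] = j - i + 1
def pvBLoop (nums : List Int) (W : Nat) : Nat → Nat → List Int → List Int → List Int
  | 0, _, _, result => result
  | c + 1, j, cnt, result =>
      let cnt1 := pvBump (PySem.List.pyGetD nums (c : Int) 0) W 1 cnt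
      let p := pvShrink nums W c j cnt1
      pvBLoop nums W c p.1 p.2
        (PySem.List.pySetD result (c : Int) ((p.1 : Int) - (c : Int) + 1))

def smallestSubarrays_alt (nums : List Int) : List Int :=
  let n := nums.length
  let width := max (PySem.Int.bitLength ((PySem.List.max? nums id).getD 0)) 1
  pvBLoop nums width n (n - 1) (List.replicate width 0) (List.replicate n 0)

-- ===== PRECONDITION & SPEC =====
-- Pre_ excludes only the empty list, on which Python's max(nums) raises ValueError (in A and in B alike).
def Pre_smallestSubarrays (nums : List Int) : Prop := nums ≠ []
instance (nums : List Int) : Decidable (Pre_smallestSubarrays nums) := by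
  unfold Pre_smallestSubarrays; infer_instance

def pvWitness_smallestSubarrays : List Int := [6, -3, 0, 5]

def Spec_smallestSubarrays (nums : List Int) (out : List Int) : Prop := out = smallestSubarrays_alt nums
instance (nums : List Int) (out : List Int) : Decidable (Spec_smallestSubarrays nums out) := by
  unfold Spec_smallestSubarrays; infer_instance

-- ===== CLAIM (what is proved, stated in full; the proofs are below) =====
def Claim_equal_smallestSubarrays : Prop := ∀ (nums : List Int), Dom_smallestSubarrays nums → Pre_smallestSubarrays nums → Spec_smallestSubarrays nums (smallestSubarrays nums)

-- ===== LEMMAS AND PROOFS =====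

-- ---- proof-side vocabulary ----

-- the truthiness test  x & (1 << b)  (shared by both ports)
def pvTestA (x : Int) (b : Nat) : Bool := PySem.Int.band x ((1 : Int) <<< b) != 0

-- first index k ≥ i with bit b set in nums[k] (Python-truthiness), else -1
def pvFo (nums : List Int) (i b : Nat) : Int :=
  match (nums.drop i).findIdx? (fun x => pvTestA x b) with
  | none => -1
  | some k => ((i + k : Nat) : Int)

-- number of indices k in [i, j] with bit b set in nums[k]
def pvCntI (nums : List Int) (i j b : Nat) : Int :=
  (((List.range' i (j + 1 - i)).countP (fun k => pvTestA (nums.getD k 0) b) : Nat) : Int)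

def pvCnt (nums : List Int) (W i j : Nat) : List Int :=
  (List.range W).map (pvCntI nums i j)

-- max over bits b < W of pvFo (i.e. the final content of A's lookup max)
def pvM (nums : List Int) (W i : Nat) : Int :=
  ((List.range W).map (pvFo nums i)).foldr max (-1)

-- the settled right pointer for window start i
def pvJn (nums : List Int) (W i : Nat) : Nat := max i (pvM nums W i).toNat

-- the inner bit loop of A
def pvUpd (nums : List Int) (c : Nat) (lk : List Int) : List Int :=
  (List.range lk.length).foldl
    (fun (l : List Int) (bit : Nat) =>
      if PySem.Int.band (PySem.List.pyGetD nums (c : Int) 0) ((1 : Int) <<< bit) ≠ 0 then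
        PySem.List.pySetD l (bit : Int) (c : Int)
      else l) lk

-- lookup table state of A when indices c..n-1 have been processed
def pvT (nums : List Int) (W : Nat) (c : Nat) : List Int :=
  if h : c < nums.length then pvUpd nums c (pvT nums W (c + 1)) else List.replicate W (-1)
  termination_by nums.length - c
  decreasing_by omega

def pvAns (nums : List Int) (W c : Nat) : Int :=
  max ((PySem.List.max? (pvT nums W c) id).getD 0 - (c : Int) + 1) 1

def pvFill (nums : List Int) (W : Nat) : Nat → List Int → List Int
  | 0, res => res
  | c + 1, res => pvFill nums W c (PySem.List.pySetD res (c : Int) (pvAns nums W c))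

def pvW (nums : List Int) : Nat := max (PySem.Int.bitLength ((PySem.List.max? nums id).getD 0)) 1

-- ---- generic fold/set lemmas ----

lemma pv_foldl_set_length (v : Int) (P : Nat → Prop) [DecidablePred P] :
    ∀ (m : Nat) (lk : List Int),
      ((List.range m).foldl (fun l bit => if P bit then l.set bit v else l) lk).length =
        lk.length := by
  intro m
  induction m with
  | zero => intro lk; simp
  | succ m ih =>
      intro lk
      rw [List.range_succ, List.foldl_append]
      simp only [List.foldl_cons, List.foldl_nil]
      split <;> simp [ih]

lemma pv_foldl_set_getElem? (v : Int) (P : Nat → Prop) [DecidablePred P] :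
    ∀ (m : Nat) (lk : List Int) (b : Nat),
      ((List.range m).foldl (fun l bit => if P bit then l.set bit v else l) lk)[b]? =
        if b < m ∧ P b then lk[b]?.map (fun _ => v) else lk[b]? := by
  intro m
  induction m with
  | zero => intro lk b; simp
  | succ m ih =>
      intro lk b
      rw [List.range_succ, List.foldl_append]
      simp only [List.foldl_cons, List.foldl_nil]
      have hlen := pv_foldl_set_length v P m lk
      by_cases hPm : P m
      · rw [if_pos hPm, List.getElem?_set]
        by_cases hbm : m = b
        · subst hbm
          rw [if_pos rfl, hlen]
          by_cases hb : m < lk.length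
          · simp [hb, hPm, List.getElem?_eq_getElem hb]
          · simp [hb, hPm, List.getElem?_eq_none (by omega : lk.length ≤ m)]
        · rw [if_neg hbm, ih lk b]
          have : (b < m + 1 ∧ P b) ↔ (b < m ∧ P b) := by
            constructor
            · rintro ⟨h1, h2⟩; exact ⟨by omega, h2⟩
            · rintro ⟨h1, h2⟩; exact ⟨by omega, h2⟩
          rw [if_congr this rfl rfl]
      · rw [if_neg hPm, ih lk b]
        have : (b < m ∧ P b) ↔ (b < m + 1 ∧ P b) := by
          constructor
          · rintro ⟨h1, h2⟩; exact ⟨by omega, h2⟩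
          · rintro ⟨h1, h2⟩
            refine ⟨?_, h2⟩
            rcases Nat.lt_succ_iff_lt_or_eq.mp h1 with h | h
            · exact h
            · subst h; exact absurd h2 hPm
        rw [← if_congr this rfl rfl]

lemma pvUpd_length (nums : List Int) (c : Nat) (lk : List Int) :
    (pvUpd nums c lk).length = lk.length := by
  unfold pvUpd
  have hbody : (fun (l : List Int) (bit : Nat) =>
      if PySem.Int.band (PySem.List.pyGetD nums (c : Int) 0) ((1 : Int) <<< bit) ≠ 0 then
        PySem.List.pySetD l (bit : Int) (c : Int)
      else l) =
      (fun (l : List Int) (bit : Nat) =>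
      if PySem.Int.band (PySem.List.pyGetD nums (c : Int) 0) ((1 : Int) <<< bit) ≠ 0 then
        l.set bit (c : Int)
      else l) := by
    funext l bit
    split <;> simp
  rw [hbody]
  exact pv_foldl_set_length _ _ _ _

lemma pvUpd_getElem? (nums : List Int) (c : Nat) (lk : List Int) (b : Nat) :
    (pvUpd nums c lk)[b]? =
      if pvTestA (PySem.List.pyGetD nums (c : Int) 0) b then lk[b]?.map (fun _ => (c : Int))
      else lk[b]? := by
  unfold pvUpd
  have hbody : (fun (l : List Int) (bit : Nat) =>
      if PySem.Int.band (PySem.List.pyGetD nums (c : Int) 0) ((1 : Int) <<< bit) ≠ 0 then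
        PySem.List.pySetD l (bit : Int) (c : Int)
      else l) =
      (fun (l : List Int) (bit : Nat) =>
      if PySem.Int.band (PySem.List.pyGetD nums (c : Int) 0) ((1 : Int) <<< bit) ≠ 0 then
        l.set bit (c : Int)
      else l) := by
    funext l bit
    split <;> simp
  rw [hbody]
  rw [pv_foldl_set_getElem? (v := (c : Int))
    (P := fun bit : Nat => PySem.Int.band (PySem.List.pyGetD nums (c : Int) 0) ((1 : Int) <<< bit) ≠ 0)
    (m := lk.length) (lk := lk) (b := b)]
  set x := PySem.List.pyGetD nums (c : Int) 0 with hx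
  by_cases hP : PySem.Int.band x ((1 : Int) <<< b) = 0
  · have h1 : pvTestA x b = false := by
      simp [pvTestA, hP]
    rw [h1]
    simp [hP]
  · have h1 : pvTestA x b = true := by
      simp [pvTestA, hP]
    rw [h1]
    by_cases hb : b < lk.length
    · simp [hP, hb]
    · simp [hP, hb, List.getElem?_eq_none (by omega : lk.length ≤ b)]

-- ---- A-side characterization ----

lemma pvT_length (nums : List Int) (W : Nat) (c : Nat) : (pvT nums W c).length = W := by
  suffices H : ∀ k c, nums.length - c ≤ k → (pvT nums W c).length = W by
    exact H nums.length c (by omega)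
  intro k
  induction k with
  | zero =>
      intro c hc
      rw [pvT, dif_neg (by omega)]
      simp
  | succ k ih =>
      intro c hc
      by_cases h : c < nums.length
      · rw [pvT, dif_pos h, pvUpd_length]
        exact ih (c + 1) (by omega)
      · rw [pvT, dif_neg h]; simp

lemma pvT_getElem? (nums : List Int) (W : Nat) (c : Nat) (b : Nat) :
    (pvT nums W c)[b]? = if b < W then some (pvFo nums c b) else none := by
  suffices H : ∀ k c, nums.length - c ≤ k →
      ∀ b, (pvT nums W c)[b]? = if b < W then some (pvFo nums c b) else none by
    exact H nums.length c (by omega) b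
  intro k
  induction k with
  | zero =>
      intro c hc b
      rw [pvT, dif_neg (by omega)]
      have hd : nums.drop c = [] := List.drop_eq_nil_of_le (by omega)
      simp [pvFo, hd, List.getElem?_replicate]
  | succ k ih =>
      intro c hc b
      by_cases h : c < nums.length
      · rw [pvT, dif_pos h, pvUpd_getElem?, ih (c + 1) (by omega) b]
        by_cases hbW : b < W
        · simp only [hbW, if_true]
          have hg : PySem.List.pyGetD nums ((c : Nat) : Int) 0 = nums[c] := by
            simp [PySem.List.pyGetD_natCast, List.getD_eq_getElem?_getD, List.getElem?_eq_getElem h]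
          have hfo : pvFo nums c b =
              if pvTestA nums[c] b then ((c : Nat) : Int) else pvFo nums (c + 1) b := by
            rw [pvFo, List.drop_eq_getElem_cons h, List.findIdx?_cons]
            by_cases hp : pvTestA nums[c] b
            · simp [hp]
            · rw [if_neg (by simpa using hp), if_neg hp, pvFo]
              cases e : (nums.drop (c + 1)).findIdx? (fun x => pvTestA x b) with
              | none => simp [e]
              | some kk => simp [e]; push_cast; ring
          rw [hg, hfo]
          by_cases hp : pvTestA nums[c] b <;> simp [hp]
        · simp [hbW]
      · rw [pvT, dif_neg h]
        have hd : nums.drop c = [] := List.drop_eq_nil_of_le (by omega)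
        simp [pvFo, hd, List.getElem?_replicate]

lemma pvALoop_eq_fill (nums : List Int) (W : Nat) :
    ∀ (c : Nat), c ≤ nums.length → ∀ res,
      pvALoop nums c res (pvT nums W c) = pvFill nums W c res := by
  intro c
  induction c with
  | zero => intro _ res; rfl
  | succ c ih =>
      intro hc res
      have hT : pvT nums W c = pvUpd nums c (pvT nums W (c + 1)) := by
        rw [pvT, dif_pos (by omega)]
      rw [pvFill, ← ih (by omega) (PySem.List.pySetD res (c : Int) (pvAns nums W c))]
      show pvALoop nums c
          (PySem.List.pySetD res (c : Int)
            (max ((PySem.List.max? (pvUpd nums c (pvT nums W (c + 1))) id).getD 0 - (c : Int) + 1) 1))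
          (pvUpd nums c (pvT nums W (c + 1))) =
        pvALoop nums c (PySem.List.pySetD res (c : Int) (pvAns nums W c)) (pvT nums W c)
      rw [← hT, pvAns]

lemma pvA_eq_fill (nums : List Int) :
    smallestSubarrays nums =
      pvFill nums (pvW nums) nums.length (List.replicate nums.length 0) := by
  unfold smallestSubarrays
  have hT : List.replicate (max (PySem.Int.bitLength ((PySem.List.max? nums id).getD 0)) 1)
      (-1 : Int) = pvT nums (pvW nums) nums.length := by
    rw [pvT, dif_neg (by omega)]; rfl
  rw [hT]
  exact pvALoop_eq_fill nums (pvW nums) nums.length le_rfl _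

-- ---- max? helper ----

lemma pv_max_spec (l : List Int) (h : l ≠ []) :
    ∃ M, (PySem.List.max? l id).getD 0 = M ∧ M ∈ l ∧ ∀ y ∈ l, y ≤ M := by
  cases e : PySem.List.max? l id with
  | none => exact absurd ((PySem.List.max?_eq_none_iff l id).mp e) h
  | some m =>
      exact ⟨m, by simp [e], PySem.List.max?_mem e,
        fun y hy => by simpa using PySem.List.max?_isMax e y hy⟩

-- ---- fold-max lemmas ----

lemma pv_le_foldrMax : ∀ (l : List Int) (x : Int), x ∈ l → x ≤ l.foldr max (-1) := by
  intro l
  induction l with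
  | nil => intro x hx; simp at hx
  | cons y t ih =>
      intro x hx
      rcases List.mem_cons.mp hx with h | h
      · subst h; exact le_max_left _ _
      · exact le_trans (ih x h) (le_max_right _ _)

lemma pv_neg_one_le_foldrMax : ∀ (l : List Int), -1 ≤ l.foldr max (-1) := by
  intro l
  induction l with
  | nil => simp
  | cons y t ih => exact le_trans ih (le_max_right _ _)

lemma pv_foldrMax_mem : ∀ (l : List Int), l.foldr max (-1) = -1 ∨ l.foldr max (-1) ∈ l := by
  intro l
  induction l with
  | nil => left; rfl
  | cons y t ih =>
      rcases max_choice y (t.foldr max (-1)) with h | h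
      · right; simp [List.foldr_cons, h]
      · rcases ih with h2 | h2
        · left; rw [List.foldr_cons, h, h2]
        · right; simp only [List.foldr_cons, h]; exact List.mem_cons_of_mem _ h2

-- ---- pvFo / pvM / pvJn facts ----

lemma pvFo_bounds (nums : List Int) (i b : Nat) :
    pvFo nums i b = -1 ∨ ((i : Int) ≤ pvFo nums i b ∧ pvFo nums i b < nums.length) := by
  unfold pvFo
  cases e : (nums.drop i).findIdx? (fun x => pvTestA x b) with
  | none => left; rfl
  | some k =>
      right
      obtain ⟨hk, -, -⟩ := List.findIdx?_eq_some_iff_getElem.mp e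
      rw [List.length_drop] at hk
      constructor
      · push_cast; omega
      · push_cast; omega

lemma pvFo_step (nums : List Int) (c b : Nat) (h : c < nums.length) :
    pvFo nums c b = if pvTestA nums[c] b then ((c : Nat) : Int) else pvFo nums (c + 1) b := by
  rw [pvFo, List.drop_eq_getElem_cons h, List.findIdx?_cons]
  by_cases hp : pvTestA nums[c] b
  · simp [hp]
  · rw [if_neg (by simpa using hp), if_neg hp, pvFo]
    cases e : (nums.drop (c + 1)).findIdx? (fun x => pvTestA x b) with
    | none => simp [e]
    | some kk => simp [e]; push_cast; ring

-- if 0 ≤ pvFo, then pvFo is an index ≥ i, < n, with bit b set there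
lemma pvFo_self (nums : List Int) (i b : Nat) (h : 0 ≤ pvFo nums i b) :
    i ≤ (pvFo nums i b).toNat ∧ (pvFo nums i b).toNat < nums.length ∧
      pvTestA (nums.getD (pvFo nums i b).toNat 0) b = true := by
  cases e : (nums.drop i).findIdx? (fun x => pvTestA x b) with
  | none =>
      have hv : pvFo nums i b = -1 := by unfold pvFo; rw [e]
      rw [hv] at h; norm_num at h
  | some k =>
      have hv : pvFo nums i b = ((i + k : Nat) : Int) := by unfold pvFo; rw [e]
      rw [hv]
      obtain ⟨hk, hpk, -⟩ := List.findIdx?_eq_some_iff_getElem.mp e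
      have hkn : i + k < nums.length := by
        rw [List.length_drop] at hk; omega
      have htn : (((i + k : Nat) : Int)).toNat = i + k := by omega
      refine ⟨by omega, by omega, ?_⟩
      have hget : nums.getD (((i + k : Nat) : Int)).toNat 0 = nums[i + k] := by
        rw [htn]
        simp [List.getD_eq_getElem?_getD, List.getElem?_eq_getElem hkn]
      rw [hget, ← List.getElem_drop]
      exact hpk

lemma pvM_attained (nums : List Int) (W i : Nat) :
    pvM nums W i = -1 ∨ ∃ b < W, pvM nums W i = pvFo nums i b := by
  rcases pv_foldrMax_mem ((List.range W).map (pvFo nums i)) with h | h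
  · left; exact h
  · right
    obtain ⟨b, hb, he⟩ := List.mem_map.mp h
    exact ⟨b, List.mem_range.mp hb, he.symm⟩

lemma pvM_bounds (nums : List Int) (W i : Nat) :
    pvM nums W i = -1 ∨ ((i : Int) ≤ pvM nums W i ∧ pvM nums W i < nums.length) := by
  rcases pvM_attained nums W i with h | ⟨b, -, he⟩
  · left; exact h
  · rcases pvFo_bounds nums i b with h2 | h2
    · left; rw [he, h2]
    · right; rw [he]; exact h2

lemma pvFo_le_pvM (nums : List Int) (W i b : Nat) (hb : b < W) :
    pvFo nums i b ≤ pvM nums W i := by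
  exact pv_le_foldrMax _ _ (List.mem_map.mpr ⟨b, List.mem_range.mpr hb, rfl⟩)

lemma pvJn_lt (nums : List Int) (W i : Nat) (hi : i < nums.length) : pvJn nums W i < nums.length := by
  unfold pvJn
  rcases pvM_bounds nums W i with h | ⟨h1, h2⟩ <;> omega

lemma pvJn_step (nums : List Int) (W c : Nat) (hc : c < nums.length) :
    pvJn nums W c ≤ max c (pvJn nums W (c + 1)) := by
  have h1 : pvM nums W c ≤ max (c : Int) (pvM nums W (c + 1)) := by
    rcases pvM_attained nums W c with h | ⟨b, hb, he⟩
    · rw [h]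
      have := le_max_left (c : Int) (pvM nums W (c + 1))
      omega
    · rw [he, pvFo_step nums c b hc]
      by_cases hp : pvTestA nums[c] b
      · rw [if_pos hp]; exact le_max_left _ _
      · rw [if_neg hp]
        exact le_trans (pvFo_le_pvM nums W (c + 1) b hb) (le_max_right _ _)
  have h2 : -1 ≤ pvM nums W (c + 1) := pv_neg_one_le_foldrMax _
  unfold pvJn
  omega

-- ---- bump/cond characterizations ----

lemma pv_foldl_modify_length (g : Nat → Int → Int) (P : Nat → Prop) [DecidablePred P] :
    ∀ (m : Nat) (cnt : List Int),
      ((List.range m).foldl (fun (ac : List Int) (bit : Nat) => if P bit then ac.set bit (g bit (ac[bit]?.getD 0)) else ac)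
        cnt).length = cnt.length := by
  intro m
  induction m with
  | zero => intro cnt; simp
  | succ m ih =>
      intro cnt
      rw [List.range_succ, List.foldl_append]
      simp only [List.foldl_cons, List.foldl_nil]
      split <;> simp [ih]

lemma pv_foldl_modify_getElem? (g : Nat → Int → Int) (P : Nat → Prop) [DecidablePred P] :
    ∀ (m : Nat) (cnt : List Int) (b : Nat),
      ((List.range m).foldl (fun (ac : List Int) (bit : Nat) => if P bit then ac.set bit (g bit (ac[bit]?.getD 0)) else ac)
        cnt)[b]? = if b < m ∧ P b then cnt[b]?.map (g b) else cnt[b]? := by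
  intro m
  induction m with
  | zero => intro cnt b; simp
  | succ m ih =>
      intro cnt b
      rw [List.range_succ, List.foldl_append]
      simp only [List.foldl_cons, List.foldl_nil]
      set F := (List.range m).foldl
        (fun (ac : List Int) (bit : Nat) => if P bit then ac.set bit (g bit (ac[bit]?.getD 0)) else ac) cnt with hF
      have hread : F[m]?.getD 0 = (cnt[m]?).getD 0 := by
        rw [ih cnt m]
        simp
      by_cases hPm : P m
      · rw [if_pos hPm, List.getElem?_set]
        by_cases hbm : m = b
        · subst hbm
          rw [if_pos rfl]
          have hlen : F.length = cnt.length := pv_foldl_modify_length g P m cnt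
          rw [hlen]
          by_cases hb : m < cnt.length
          · rw [if_pos hb, if_pos ⟨by omega, hPm⟩, hread, List.getElem?_eq_getElem hb]
            simp
          · rw [if_neg hb, List.getElem?_eq_none (by omega : cnt.length ≤ m)]
            simp
        · rw [if_neg hbm, ih cnt b]
          by_cases h1 : b < m ∧ P b
          · rw [if_pos h1, if_pos ⟨by omega, h1.2⟩]
          · rw [if_neg h1]
            rw [if_neg (fun h2 => h1 ⟨by omega, h2.2⟩)]
      · rw [if_neg hPm, ih cnt b]
        by_cases h1 : b < m ∧ P b
        · rw [if_pos h1, if_pos ⟨by omega, h1.2⟩]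
        · rw [if_neg h1]
          by_cases h2 : b < m + 1 ∧ P b
          · exfalso
            rcases h2 with ⟨h2a, h2b⟩
            rcases Nat.lt_succ_iff_lt_or_eq.mp h2a with h | h
            · exact h1 ⟨h, h2b⟩
            · subst h; exact hPm h2b
          · rw [if_neg h2]

lemma pvBump_char (x : Int) (W : Nat) (s : Int) (f : Nat → Int) :
    pvBump x W s ((List.range W).map f) =
      (List.range W).map (fun b => f b + if pvTestA x b then s else 0) := by
  unfold pvBump
  have hbody : (fun (c : List Int) (b : Nat) =>
      if PySem.Int.band x ((1 : Int) <<< b) ≠ 0 then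
        PySem.List.pySetD c (b : Int) (PySem.List.pyGetD c (b : Int) 0 + s)
      else c) =
      (fun (ac : List Int) (b : Nat) =>
      if PySem.Int.band x ((1 : Int) <<< b) ≠ 0 then
        ac.set b (ac[b]?.getD 0 + s)
      else ac) := by
    funext ac b
    split <;> simp [PySem.List.pyGetD_natCast]
  rw [hbody]
  apply List.ext_getElem?
  intro b
  rw [pv_foldl_modify_getElem? (fun _ v => v + s)
    (fun b => PySem.Int.band x ((1 : Int) <<< b) ≠ 0) W ((List.range W).map f) b]
  by_cases hb : b < W
  · rw [List.getElem?_map, List.getElem?_map, List.getElem?_range hb]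
    by_cases hP : PySem.Int.band x ((1 : Int) <<< b) = 0
    · have ht : pvTestA x b = false := by simp [pvTestA, hP]
      rw [if_neg (by simp [hb, hP])]
      simp [ht]
    · have ht : pvTestA x b = true := by simp [pvTestA, hP]
      rw [if_pos ⟨hb, hP⟩]
      simp [ht]
  · have h1 : ((List.range W).map f)[b]? = none := by
      rw [List.getElem?_eq_none]; simp; omega
    have h2 : ((List.range W).map
        (fun b => f b + if pvTestA x b then s else 0))[b]? = none := by
      rw [List.getElem?_eq_none]; simp; omega
    rw [if_neg (fun h3 => hb h3.1), h1, h2]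

lemma pvAllCond_iff (x : Int) (W : Nat) (f : Nat → Int) :
    pvAllCond x W ((List.range W).map f) = true ↔
      ∀ b, b < W → pvTestA x b = true → 1 < f b := by
  unfold pvAllCond
  rw [List.all_eq_true]
  constructor
  · intro H b hb hbit
    have := H b (List.mem_range.mpr hb)
    rw [if_pos (by simpa [pvTestA] using hbit)] at this
    have hget : PySem.List.pyGetD ((List.range W).map f) (b : Int) 0 = f b := by
      rw [PySem.List.pyGetD_natCast, List.getD_eq_getElem?_getD,
        List.getElem?_map, List.getElem?_range hb]
      rfl
    rw [hget] at this
    exact of_decide_eq_true this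
  · intro H b hbm
    have hb : b < W := List.mem_range.mp hbm
    by_cases hbit : pvTestA x b
    · rw [if_pos (by simpa [pvTestA] using hbit)]
      have hget : PySem.List.pyGetD ((List.range W).map f) (b : Int) 0 = f b := by
        rw [PySem.List.pyGetD_natCast, List.getD_eq_getElem?_getD,
          List.getElem?_map, List.getElem?_range hb]
        rfl
      rw [hget]
      exact decide_eq_true (H b hb hbit)
    · rw [if_neg (by simpa [pvTestA] using hbit)]

-- ---- counting lemmas ----

lemma pvCntI_cons (nums : List Int) (i j b : Nat) (hij : i ≤ j) :
    pvCntI nums i j b =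
      (if pvTestA (nums.getD i 0) b then 1 else 0) + pvCntI nums (i + 1) j b := by
  unfold pvCntI
  have h1 : j + 1 - i = (j - i) + 1 := by omega
  have h2 : j + 1 - (i + 1) = j - i := by omega
  rw [h1, h2, List.range'_succ, List.countP_cons]
  by_cases hp : pvTestA (nums.getD i 0) b
  · rw [if_pos hp, if_pos (by simpa using hp)]
    push_cast; ring
  · rw [if_neg hp, if_neg (by simpa using hp)]
    push_cast; ring

lemma pvCntI_snoc (nums : List Int) (i j b : Nat) (hij : i < j) :
    pvCntI nums i j b =
      pvCntI nums i (j - 1) b + (if pvTestA (nums.getD j 0) b then 1 else 0) := by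
  unfold pvCntI
  have h1 : j + 1 - i = (j - i) + 1 := by omega
  have h2 : j - 1 + 1 - i = j - i := by omega
  have h3 : i + (j - i) = j := by omega
  rw [h1, h2, List.range'_1_concat, List.countP_append, h3, List.countP_cons, List.countP_nil]
  by_cases hp : pvTestA (nums.getD j 0) b
  · rw [if_pos hp, if_pos (by simpa using hp)]
    push_cast; ring
  · rw [if_neg hp, if_neg (by simpa using hp)]
    push_cast; ring

lemma pvBump_add (nums : List Int) (W i j : Nat) (hij : i ≤ j) :
    pvBump (PySem.List.pyGetD nums (i : Int) 0) W 1 (pvCnt nums W (i + 1) j) =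
      pvCnt nums W i j := by
  unfold pvCnt
  rw [pvBump_char]
  apply List.map_congr_left
  intro b _
  rw [pvCntI_cons nums i j b hij, PySem.List.pyGetD_natCast]
  ring

lemma pvBump_sub (nums : List Int) (W i j : Nat) (hij : i < j) :
    pvBump (PySem.List.pyGetD nums (j : Int) 0) W (-1) (pvCnt nums W i j) =
      pvCnt nums W i (j - 1) := by
  unfold pvCnt
  rw [pvBump_char]
  apply List.map_congr_left
  intro b _
  rw [pvCntI_snoc nums i j b hij, PySem.List.pyGetD_natCast]
  by_cases hp : pvTestA (nums.getD j 0) b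
  · rw [if_pos hp, if_pos hp]; ring
  · rw [if_neg hp, if_neg hp]; ring

-- count ≥ 2 from two distinct witnesses
lemma pvCntI_ge_two (nums : List Int) (i j b k1 k2 : Nat)
    (h1 : i ≤ k1) (h2 : k1 < k2) (h3 : k2 ≤ j)
    (p1 : pvTestA (nums.getD k1 0) b = true) (p2 : pvTestA (nums.getD k2 0) b = true) :
    2 ≤ pvCntI nums i j b := by
  unfold pvCntI
  have key : 2 ≤ (List.range' i (j + 1 - i)).countP (fun k => pvTestA (nums.getD k 0) b) := by
    rw [List.countP_eq_length_filter]
    have hsub : [k1, k2] ⊆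
        (List.range' i (j + 1 - i)).filter (fun k => pvTestA (nums.getD k 0) b) := by
      intro a ha
      rw [List.mem_filter]
      rcases List.mem_cons.mp ha with h | h
      · subst h
        exact ⟨List.mem_range'_1.mpr ⟨h1, by omega⟩, p1⟩
      · rcases List.mem_cons.mp h with h' | h'
        · subst h'
          exact ⟨List.mem_range'_1.mpr ⟨by omega, by omega⟩, p2⟩
        · simp at h'
    have hnd : ([k1, k2]).Nodup := by simp; omega
    have := (hnd.subperm hsub).length_le
    simpa using this
  exact_mod_cast key

-- if the first occurrence (at or after i) of bit b is exactly j, the count over [i, j] is 1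
lemma pvCntI_first (nums : List Int) (i j b : Nat) (hij : i ≤ j) (hj : j < nums.length)
    (hfo : pvFo nums i b = (j : Int)) :
    pvCntI nums i j b = 1 := by
  have hkex : (nums.drop i).findIdx? (fun x => pvTestA x b) = some (j - i) := by
    cases e : (nums.drop i).findIdx? (fun x => pvTestA x b) with
    | none =>
        exfalso
        have hv : pvFo nums i b = -1 := by unfold pvFo; rw [e]
        rw [hv] at hfo; omega
    | some k =>
        have hv : pvFo nums i b = ((i + k : Nat) : Int) := by unfold pvFo; rw [e]
        rw [hv] at hfo
        have : i + k = j := by exact_mod_cast hfo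
        rw [show j - i = k by omega]
  obtain ⟨hk, hpk, hmin⟩ := List.findIdx?_eq_some_iff_getElem.mp hkex
  unfold pvCntI
  have h1 : j + 1 - i = (j - i) + 1 := by omega
  have h3 : i + (j - i) = j := by omega
  rw [h1, List.range'_1_concat, List.countP_append, h3, List.countP_cons, List.countP_nil]
  have hc0 : (List.range' i (j - i)).countP (fun k => pvTestA (nums.getD k 0) b) = 0 := by
    rw [List.countP_eq_zero]
    intro a ha
    obtain ⟨ha1, ha2⟩ := List.mem_range'_1.mp ha
    have han : a < nums.length := by omega
    have hlt : a - i < j - i := by omega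
    have := hmin (a - i) hlt
    have hdg : (nums.drop i)[a - i]'(by rw [List.length_drop]; omega) = nums[a]'han := by
      rw [List.getElem_drop]
      congr 1 <;> omega
    rw [hdg] at this
    simp only [List.getD_eq_getElem?_getD, List.getElem?_eq_getElem han]
    simpa using this
  have hc1 : pvTestA (nums.getD j 0) b = true := by
    have hdg : (nums.drop i)[j - i]'(by rw [List.length_drop]; omega) = nums[j]'hj := by
      rw [List.getElem_drop]
      congr 1 <;> omega
    rw [hdg] at hpk
    simpa [List.getD_eq_getElem?_getD, List.getElem?_eq_getElem hj] using hpk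
  rw [hc0, hc1]
  simp

lemma pvFo_of_bit (nums : List Int) (i j b : Nat) (hij : i ≤ j) (hj : j < nums.length)
    (hp : pvTestA nums[j] b = true) :
    0 ≤ pvFo nums i b ∧ pvFo nums i b ≤ (j : Int) := by
  cases e : (nums.drop i).findIdx? (fun x => pvTestA x b) with
  | none =>
      exfalso
      have hmem : nums[j] ∈ nums.drop i := by
        rw [List.mem_iff_getElem]
        refine ⟨j - i, by rw [List.length_drop]; omega, ?_⟩
        rw [List.getElem_drop]
        congr 1
        omega
      have := List.findIdx?_eq_none_iff.mp e _ hmem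
      rw [hp] at this
      simp at this
  | some k =>
      have hv : pvFo nums i b = ((i + k : Nat) : Int) := by unfold pvFo; rw [e]
      obtain ⟨hk, hpk, hmin⟩ := List.findIdx?_eq_some_iff_getElem.mp e
      have hkj : k ≤ j - i := by
        by_contra hkj
        have := hmin (j - i) (by omega)
        have hdg : (nums.drop i)[j - i]'(by rw [List.length_drop]; omega) = nums[j]'hj := by
          rw [List.getElem_drop]
          congr 1
          omega
        rw [hdg, hp] at this
        simp at this
      rw [hv]
      constructor
      · positivity
      · push_cast; omega

-- ---- the shrink loop ----

lemma pvShrink_eq (nums : List Int) (W i : Nat) (hi : i < nums.length) :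
    ∀ j, i ≤ j → j < nums.length → pvJn nums W i ≤ j →
      pvShrink nums W i j (pvCnt nums W i j) =
        (pvJn nums W i, pvCnt nums W i (pvJn nums W i)) := by
  intro j
  induction j using Nat.strong_induction_on with
  | _ j ih =>
    intro hij hjn hJj
    rw [pvShrink]
    by_cases hgt : pvJn nums W i < j
    · have hilt : i < j := by
        have : i ≤ pvJn nums W i := le_max_left _ _
        omega
      have hget : PySem.List.pyGetD nums ((j : Nat) : Int) 0 = nums.getD j 0 :=
        PySem.List.pyGetD_natCast nums j 0
      have hgete : nums.getD j 0 = nums[j] := by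
        rw [List.getD_eq_getElem?_getD, List.getElem?_eq_getElem hjn]
        rfl
      have hcond : pvAllCond (PySem.List.pyGetD nums (j : Int) 0) W (pvCnt nums W i j) = true := by
        rw [hget, hgete]
        unfold pvCnt
        rw [pvAllCond_iff]
        intro b hb hbit
        obtain ⟨h0, hle⟩ := pvFo_of_bit nums i j b (le_of_lt hilt) hjn hbit
        have hfoM := pvFo_le_pvM nums W i b hb
        have hM0 : 0 ≤ pvM nums W i := le_trans h0 hfoM
        have hMJ : (pvM nums W i).toNat ≤ pvJn nums W i := le_max_right _ _
        obtain ⟨hk1i, hk1n, hk1bit⟩ := pvFo_self nums i b h0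
        have hk1j : (pvFo nums i b).toNat < j := by omega
        have hbitD : pvTestA (nums.getD j 0) b = true := by
          rw [hgete]
          exact hbit
        have h2 := pvCntI_ge_two nums i j b (pvFo nums i b).toNat j hk1i hk1j le_rfl
          hk1bit hbitD
        omega
      rw [dif_pos ⟨hilt, hcond⟩, pvBump_sub nums W i j hilt]
      exact ih (j - 1) (by omega) (by omega) (by omega) (by omega)
    · have hje : j = pvJn nums W i := by omega
      by_cases hii : i < j
      · have hM : pvM nums W i = (j : Int) := by
          rcases pvM_bounds nums W i with h | ⟨h1, h2⟩
          · exfalso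
            unfold pvJn at hje
            rw [h] at hje
            simp at hje
            omega
          · unfold pvJn at hje
            omega
        rcases pvM_attained nums W i with h | ⟨b, hbW, hbe⟩
        · rw [hM] at h; omega
        · have hfo : pvFo nums i b = (j : Int) := by rw [← hbe, hM]
          have hcnt1 := pvCntI_first nums i j b (le_of_lt hii) hjn hfo
          have h0 : 0 ≤ pvFo nums i b := by rw [hfo]; positivity
          obtain ⟨-, -, hbitg⟩ := pvFo_self nums i b h0
          have hbitj : pvTestA (nums.getD j 0) b = true := by
            rw [hfo] at hbitg
            simpa using hbitg
          rw [dif_neg, hje]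
          rintro ⟨-, hC⟩
          rw [PySem.List.pyGetD_natCast nums j 0] at hC
          unfold pvCnt at hC
          rw [pvAllCond_iff] at hC
          have := hC b hbW hbitj
          omega
      · rw [dif_neg (fun h => hii h.1), hje]

-- ---- the main loop ----

lemma pvAns_eq_pvJn (nums : List Int) (W c : Nat) (hW : 1 ≤ W) (hc : c < nums.length) :
    pvAns nums W c = (pvJn nums W c : Int) - (c : Int) + 1 := by
  have hTlist : pvT nums W c = (List.range W).map (pvFo nums c) := by
    apply List.ext_getElem?
    intro b
    rw [pvT_getElem?, List.getElem?_map]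
    by_cases hb : b < W
    · rw [List.getElem?_range hb, if_pos hb]
      rfl
    · rw [List.getElem?_eq_none (by simp [List.length_range]; omega), if_neg hb]
      rfl
  have hTne : pvT nums W c ≠ [] := by
    have hl := pvT_length nums W c
    intro h
    rw [h] at hl
    simp at hl
    omega
  obtain ⟨M, hMgd, hMmem, hMub⟩ := pv_max_spec _ hTne
  have hMle : M ≤ pvM nums W c := by
    rw [hTlist] at hMmem
    exact pv_le_foldrMax _ _ hMmem
  have hMge : pvM nums W c ≤ M := by
    rcases pvM_attained nums W c with h | ⟨b, hb, he⟩
    · rw [h]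
      rw [hTlist] at hMmem
      obtain ⟨b, -, he⟩ := List.mem_map.mp hMmem
      rcases pvFo_bounds nums c b with h2 | ⟨h2, -⟩ <;> omega
    · rw [he]
      apply hMub
      rw [hTlist]
      exact List.mem_map.mpr ⟨b, List.mem_range.mpr hb, rfl⟩
  have hM : M = pvM nums W c := le_antisymm hMle hMge
  unfold pvAns
  rw [hMgd, hM]
  unfold pvJn
  rcases pvM_bounds nums W c with h | ⟨h1, h2⟩
  · rw [h]
    have hz : ((-1 : Int)).toNat = 0 := rfl
    rw [hz]
    omega
  · omega

lemma pvBLoop_eq_fill (nums : List Int) (W : Nat) (hW : 1 ≤ W) :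
    ∀ (c : Nat) (j : Nat), c ≤ nums.length →
      ((c = nums.length ∧ j = nums.length - 1) ∨ (c < nums.length ∧ j = pvJn nums W c)) →
      ∀ res, pvBLoop nums W c j (pvCnt nums W c j) res = pvFill nums W c res := by
  intro c
  induction c with
  | zero => intro j _ _ res; rfl
  | succ c ih =>
      intro j hc hinv res
      have hcn : c < nums.length := by omega
      obtain ⟨hcj, hjn, hJ⟩ : c ≤ j ∧ j < nums.length ∧ pvJn nums W c ≤ j := by
        rcases hinv with ⟨h1, h2⟩ | ⟨h1, h2⟩
        · have hlt := pvJn_lt nums W c hcn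
          omega
        · have hstep := pvJn_step nums W c hcn
          have hlow : c + 1 ≤ pvJn nums W (c + 1) := le_max_left _ _
          have hlt := pvJn_lt nums W (c + 1) h1
          omega
      rw [pvBLoop]
      rw [pvBump_add nums W c j hcj, pvShrink_eq nums W c hcn j hcj hjn hJ, pvFill,
        ← pvAns_eq_pvJn nums W c hW hcn]
      exact ih (pvJn nums W c) (by omega) (Or.inr ⟨hcn, rfl⟩) _

-- ===== VERDICT (by name: the statement is the Claim_ definition above) =====
theorem smallestSubarrays_spec : Claim_equal_smallestSubarrays := by
  intro nums _ hne
  unfold Spec_smallestSubarrays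
  rw [pvA_eq_fill]
  have hn : 1 ≤ nums.length := by
    cases nums with
    | nil => exact absurd rfl hne
    | cons x t => simp
  show pvFill nums (pvW nums) nums.length (List.replicate nums.length 0) = smallestSubarrays_alt nums
  have halt : smallestSubarrays_alt nums =
      pvBLoop nums (pvW nums) nums.length (nums.length - 1)
        (List.replicate (pvW nums) 0) (List.replicate nums.length 0) := rfl
  have hcnt0 : List.replicate (pvW nums) (0 : Int) =
      pvCnt nums (pvW nums) nums.length (nums.length - 1) := by
    unfold pvCnt pvCntI
    have h0 : nums.length - 1 + 1 - nums.length = 0 := by omega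
    rw [h0]
    simp
  rw [halt, hcnt0,
    pvBLoop_eq_fill nums (pvW nums) (by simp [pvW]) nums.length (nums.length - 1) le_rfl
      (Or.inl ⟨rfl, rfl⟩)]
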